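-- pv_equiv track=rewrite | github.com/hwstar-1204/Solve_Algorithm | baekjoon code/asdsdaf.py | solution
-- ===== SOURCE A (Python) =====
-- def solution(citations):
--     citations.sort()
--     answer = []
--     for i in range(len(citations)):
--         up = 0
--         down = 0
--         for c in citations:
--             if c < citations[i]:
--                 down += 1
--             elif c >citations[i]:
--                 up += 1
--             else:
--                 down += 1
--                 up += 1
--         if down == up:
--             answer.append(citations[i])
--     return max(answer)
-- ===== SOURCE B (Python) =====
-- def solution(citations):
--     # Note: like A, this sorts `citations` in place (observable side effect).
--     citations.sort()
--     n = len(citations)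
--     best = None
--     i = 0
--     while i < n:
--         # find the end of the run of equal values starting at i
--         j = i + 1
--         while j < n and citations[j] == citations[i]:
--             j += 1
--         # i values are strictly smaller, n - j strictly larger
--         if i == n - j:
--             best = citations[i]
--         i = j
--     if best is None:
--         raise ValueError("no value with equally many smaller and larger citations")
--     return best
-- ===== Notes on version B (the rewrite author's own statement) =====
-- stated objective: faster
-- what changed: A rescans the whole list for every index (quadratic); B sorts once and makes a single run-length pass over the sorted list, where the run boundaries i and j directly give the counts of strictly smaller and strictly larger elements, keeping the largest balanced value.
import Mathlib
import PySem

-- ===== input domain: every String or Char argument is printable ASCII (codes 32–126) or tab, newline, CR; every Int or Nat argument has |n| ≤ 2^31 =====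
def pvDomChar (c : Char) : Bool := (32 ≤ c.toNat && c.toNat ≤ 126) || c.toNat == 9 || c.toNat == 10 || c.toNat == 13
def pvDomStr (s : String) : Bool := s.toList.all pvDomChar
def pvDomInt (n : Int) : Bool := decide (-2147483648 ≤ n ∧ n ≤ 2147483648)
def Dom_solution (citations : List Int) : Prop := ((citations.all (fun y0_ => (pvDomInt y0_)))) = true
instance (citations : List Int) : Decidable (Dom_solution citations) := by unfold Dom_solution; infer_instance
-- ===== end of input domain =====

-- B replaces A's per-index rescan of the whole list by a single run-length pass over the
-- sorted list (asymptotically faster). Both A and B sort `citations` in place in Python;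
-- the equivalence proved here is about the return value.

-- ===== PORT A =====
def solution (citations : List Int) : Int :=
  let s := PySem.List.sorted citations (fun x => x) false
  let answer := (PySem.List.pyRange 0 (s.length : Int) 1).foldl
    (fun (acc : List Int) (i : Int) =>
      let x := PySem.List.pyGetD s i 0
      -- state (up, down), updated in one loop over the list, as in A
      let ud := s.foldl
        (fun (ud : Int × Int) c =>
          if c < x then (ud.1, ud.2 + 1)
          else if c > x then (ud.1 + 1, ud.2)
          else (ud.1 + 1, ud.2 + 1)) (0, 0)
      if ud.2 = ud.1 then acc ++ [x] else acc) []
  -- Python raises ValueError on max([]) — excluded by Pre_solution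
  (PySem.List.max? answer (fun y => y)).getD 0

-- ===== PORT B =====
-- the outer while loop of Source B: scan runs of equal values; `i` is the start index of the
-- current run inside the full sorted list of length n; the inner while loop that advances
-- j over the run is the takeWhile/dropWhile split of the tail.
def altScan (rest : List Int) (n : Nat) (i : Nat) (best : Option Int) : Option Int :=
  match rest with
  | [] => best
  | x :: t =>
    let j : Nat := i + 1 + (t.takeWhile (fun c => c == x)).length
    let best' := if (i : Int) = (n : Int) - (j : Int) then some x else best
    altScan (t.dropWhile (fun c => c == x)) n j best'
termination_by rest.length
decreasing_by
  simpa using Nat.lt_succ_of_le (List.length_dropWhile_le _ t)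

def solution_alt (citations : List Int) : Int :=
  let s := PySem.List.sorted citations (fun x => x) false
  -- Source B raises ValueError when no balanced value exists — excluded by Pre_solution
  (altScan s s.length 0 none).getD 0

-- ===== PRECONDITION & SPEC =====
-- Pre_ excludes exactly the inputs with no value having equally many smaller-or-equal and
-- larger-or-equal elements: there Python A raises ValueError (max of an empty list), and B
-- raises ValueError as well.
def Pre_solution (citations : List Int) : Prop :=
  ∃ x ∈ citations,
    citations.countP (fun c => decide (c ≤ x)) = citations.countP (fun c => decide (x ≤ c))
instance (citations : List Int) : Decidable (Pre_solution citations) := by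
  unfold Pre_solution; infer_instance

def pvWitness_solution : List Int := ([1, 3, 5])

def Spec_solution (citations : List Int) (out : Int) : Prop := out = solution_alt citations
instance (citations : List Int) (out : Int) : Decidable (Spec_solution citations out) := by unfold Spec_solution; infer_instance

-- ===== CLAIM (what is proved, stated in full; the proofs are below) =====
def Claim_equal_solution : Prop := ∀ (citations : List Int), Dom_solution citations → Pre_solution citations → Spec_solution citations (solution citations)

-- ===== LEMMAS AND PROOFS =====

-- the balance predicate both programs decide, over the full sorted list
def pvQ (s : List Int) (x : Int) : Bool :=
  s.countP (fun c => decide (c ≤ x)) == s.countP (fun c => decide (x ≤ c))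

lemma countsA (x : Int) (l : List Int) : ∀ (u d : Int),
    l.foldl (fun (ud : Int × Int) c =>
      if c < x then (ud.1, ud.2 + 1)
      else if c > x then (ud.1 + 1, ud.2)
      else (ud.1 + 1, ud.2 + 1)) (u, d)
    = (u + (l.countP (fun c => decide (x ≤ c)) : Int),
       d + (l.countP (fun c => decide (c ≤ x)) : Int)) := by
  induction l with
  | nil => simp
  | cons c t ih =>
    intro u d
    simp only [List.foldl_cons, List.countP_cons]
    rcases lt_trichotomy c x with h | h | h
    · rw [if_pos h, ih]
      have h1 : decide (x ≤ c) = false := by simp; omega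
      have h2 : decide (c ≤ x) = true := by simp; omega
      simp [h1, h2, Prod.ext_iff]; omega
    · subst h
      rw [if_neg (lt_irrefl c), if_neg (lt_irrefl c), ih]
      simp [Prod.ext_iff]; omega
    · rw [if_neg (by omega), if_pos h, ih]
      have h1 : decide (x ≤ c) = true := by simp; omega
      have h2 : decide (c ≤ x) = false := by simp; omega
      simp [h1, h2, Prod.ext_iff]; omega


lemma solution_eq (citations : List Int) :
    solution citations
      = (PySem.List.max?
          ((PySem.List.sorted citations (fun x => x) false).filter
            (pvQ (PySem.List.sorted citations (fun x => x) false)))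
          (fun y => y)).getD 0 := by
  unfold solution
  set s := PySem.List.sorted citations (fun x => x) false with hs
  simp only []
  rw [PySem.List.foldl_pyRange_zero_pyGetD' s 0
      (fun (acc : List Int) (x : Int) =>
        if (s.foldl
          (fun (ud : Int × Int) c =>
            if c < x then (ud.1, ud.2 + 1)
            else if c > x then (ud.1 + 1, ud.2)
            else (ud.1 + 1, ud.2 + 1)) (0, 0)).2 =
           (s.foldl
          (fun (ud : Int × Int) c =>
            if c < x then (ud.1, ud.2 + 1)
            else if c > x then (ud.1 + 1, ud.2)
            else (ud.1 + 1, ud.2 + 1)) (0, 0)).1 then acc ++ [x] else acc) []]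
  congr 2
  have h2 : s.foldl
      (fun (acc : List Int) (x : Int) =>
        if (s.foldl
          (fun (ud : Int × Int) c =>
            if c < x then (ud.1, ud.2 + 1)
            else if c > x then (ud.1 + 1, ud.2)
            else (ud.1 + 1, ud.2 + 1)) (0, 0)).2 =
           (s.foldl
          (fun (ud : Int × Int) c =>
            if c < x then (ud.1, ud.2 + 1)
            else if c > x then (ud.1 + 1, ud.2)
            else (ud.1 + 1, ud.2 + 1)) (0, 0)).1 then acc ++ [x] else acc) []
      = s.foldl (fun (acc : List Int) (x : Int) => if pvQ s x then acc ++ [x] else acc) [] := by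
    apply PySem.List.foldl_congr_mem
    intro acc x _
    simp only [countsA x s 0 0, pvQ]
    by_cases h : s.countP (fun c => decide (c ≤ x)) = s.countP (fun c => decide (x ≤ c))
    · rw [if_pos (by exact_mod_cast by omega), if_pos (by simpa using h)]
    · rw [if_neg (by push_cast; omega), if_neg (by simpa using h)]
  rw [h2, PySem.List.foldl_append_if_eq_filter]
  simp

lemma getLast?_of_all_eq (x : Int) : ∀ (l : List Int), (∀ y ∈ l, y = x) → (x :: l).getLast? = some x := by
  intro l
  induction l with
  | nil => intro _; rfl
  | cons b t ih =>
    intro h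
    have hb : b = x := h b (by simp)
    subst hb
    have := ih (fun y hy => h y (by simp [hy]))
    simpa using this

lemma altScan_spec_aux (s : List Int) (hs : s.Pairwise (· ≤ ·)) :
    ∀ (m : Nat) (rest pre : List Int) (best : Option Int), rest.length ≤ m →
      s = pre ++ rest → (∀ y ∈ pre, ∀ z ∈ rest, y < z) →
      altScan rest s.length pre.length best = ((rest.filter (pvQ s)).getLast?).or best := by
  intro m
  induction m with
  | zero =>
    intro rest pre best hlen hseq _
    have : rest = [] := List.eq_nil_of_length_eq_zero (Nat.le_zero.1 hlen)
    subst this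
    simp [altScan]
  | succ m ih =>
    intro rest pre best hlen hseq hpre
    cases rest with
    | nil => simp [altScan]
    | cons x t =>
      rw [altScan]
      obtain ⟨run, hrun⟩ : ∃ r, t.takeWhile (fun c => c == x) = r := ⟨_, rfl⟩
      obtain ⟨rest', hrest'⟩ : ∃ r, t.dropWhile (fun c => c == x) = r := ⟨_, rfl⟩
      rw [hrun, hrest']
      have hsplit : x :: t = (x :: run) ++ rest' := by
        rw [← hrun, ← hrest']
        simp [List.takeWhile_append_dropWhile]
      have hseq' : s = (pre ++ (x :: run)) ++ rest' := by
        rw [hseq, hsplit]; simp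
      have hruneq : ∀ y ∈ run, y = x := by
        intro y hy
        rw [← hrun] at hy
        simpa using List.mem_takeWhile_imp hy
      have hrest_pw : (x :: t).Pairwise (· ≤ ·) := by
        rw [hseq] at hs
        exact (List.pairwise_append.1 hs).2.1
      have hxt : ∀ z ∈ t, x ≤ z := (List.pairwise_cons.1 hrest_pw).1
      have ht_pw : t.Pairwise (· ≤ ·) := (List.pairwise_cons.1 hrest_pw).2
      have hsub : rest'.Sublist t := hrest' ▸ List.dropWhile_sublist _
      have hgt : ∀ z ∈ rest', x < z := by
        intro z hz
        cases hr : rest' with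
        | nil => rw [hr] at hz; cases hz
        | cons z0 t0 =>
          have hdw : t.dropWhile (fun c => c == x) = z0 :: t0 := by rw [hrest', hr]
          have hpw' : (z0 :: t0).Pairwise (· ≤ ·) := hr ▸ ht_pw.sublist hsub
          have hz0t : z0 ∈ t := hsub.mem (by rw [hr]; simp)
          have hne : (z0 == x) = false := by
            have := List.head_dropWhile_not (fun c => c == x) (l := t) (by rw [hdw]; simp)
            simp only [hdw, List.head_cons] at this
            simpa using this
          have hxz0' : x < z0 :=
            lt_of_le_of_ne (hxt z0 hz0t) (by intro he; rw [← he] at hne; simp at hne)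
          rw [hr] at hz
          rcases List.mem_cons.1 hz with h | h
          · exact h ▸ hxz0'
          · exact lt_of_lt_of_le hxz0' (List.rel_of_pairwise_cons hpw' h)
      have hprex : ∀ y ∈ pre, y < x := fun y hy => hpre y hy x (by simp)
      have hc1 : s.countP (fun c => decide (c ≤ x)) = pre.length + (run.length + 1) := by
        rw [hseq', List.countP_append, List.countP_append]
        have e1 : pre.countP (fun c => decide (c ≤ x)) = pre.length :=
          List.countP_eq_length.2 (fun y hy => by simp [le_of_lt (hprex y hy)])
        have e2 : (x :: run).countP (fun c => decide (c ≤ x)) = run.length + 1 := by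
          rw [List.countP_eq_length.2 (fun y hy => by
            rcases List.mem_cons.1 hy with h | h
            · simp [h]
            · simp [hruneq y h])]
          simp
        have e3 : rest'.countP (fun c => decide (c ≤ x)) = 0 :=
          List.countP_eq_zero.2 (fun z hz => by simp [not_le.2 (hgt z hz)])
        omega
      have hc2 : s.countP (fun c => decide (x ≤ c)) = (run.length + 1) + rest'.length := by
        rw [hseq', List.countP_append, List.countP_append]
        have e1 : pre.countP (fun c => decide (x ≤ c)) = 0 :=
          List.countP_eq_zero.2 (fun y hy => by simp [not_le.2 (hprex y hy)])
        have e2 : (x :: run).countP (fun c => decide (x ≤ c)) = run.length + 1 := by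
          rw [List.countP_eq_length.2 (fun y hy => by
            rcases List.mem_cons.1 hy with h | h
            · simp [h]
            · simp [hruneq y h])]
          simp
        have e3 : rest'.countP (fun c => decide (x ≤ c)) = rest'.length :=
          List.countP_eq_length.2 (fun z hz => by simp [le_of_lt (hgt z hz)])
        omega
      have hlens : s.length = pre.length + (run.length + 1) + rest'.length := by
        rw [hseq']; simp; omega
      have hQx : pvQ s x = decide (pre.length = rest'.length) := by
        unfold pvQ
        rw [hc1, hc2]
        by_cases hab : pre.length + (run.length + 1) = run.length + 1 + rest'.length
        · have h' : pre.length = rest'.length := by omega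
          rw [hab]
          simp [h']
        · have h' : ¬ pre.length = rest'.length := by omega
          simp [hab, h']
      have hcond : ((pre.length : Int) = (s.length : Int) - ((pre.length + 1 + run.length : Nat) : Int))
          ↔ pre.length = rest'.length := by
        push_cast
        omega
      have hlen' : rest'.length ≤ m := by
        have h1 : rest'.length ≤ t.length := hrest' ▸ List.length_dropWhile_le _ t
        simp at hlen
        omega
      have hpre' : ∀ y ∈ pre ++ (x :: run), ∀ z ∈ rest', y < z := by
        intro y hy z hz
        rcases List.mem_append.1 hy with h | h
        · exact hpre y h z (by simp [hsub.mem hz])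
        · rcases List.mem_cons.1 h with h' | h'
          · exact h' ▸ hgt z hz
          · exact (hruneq y h') ▸ hgt z hz
      have hIH := ih rest' (pre ++ (x :: run))
        (if ((pre.length : Int) = (s.length : Int) - ((pre.length + 1 + run.length : Nat) : Int))
         then some x else best) hlen' hseq' hpre'
      simp only [List.length_append, List.length_cons] at hIH
      have hjlen : pre.length + (run.length + 1) = pre.length + 1 + run.length := by omega
      rw [hjlen] at hIH
      rw [hIH]
      have hfilter : (x :: t).filter (pvQ s) = ((x :: run).filter (pvQ s)) ++ rest'.filter (pvQ s) := by
        rw [hsplit, List.filter_append]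
      have hgfilter : (x :: run).filter (pvQ s) = if pvQ s x then x :: run else [] := by
        by_cases h : pvQ s x
        · rw [if_pos h]
          apply List.filter_eq_self.2
          intro y hy
          rcases List.mem_cons.1 hy with h' | h'
          · rwa [h']
          · rwa [hruneq y h']
        · rw [if_neg h]
          apply List.filter_eq_nil_iff.2
          intro y hy
          rcases List.mem_cons.1 hy with h' | h'
          · rwa [h']
          · rwa [hruneq y h']
      rw [hfilter, hgfilter, List.getLast?_append]
      by_cases h : pre.length = rest'.length
      · rw [if_pos (hcond.2 h), if_pos (by rw [hQx]; simpa using h)]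
        rw [getLast?_of_all_eq x run hruneq]
        cases (rest'.filter (pvQ s)).getLast? <;> simp [Option.or]
      · rw [if_neg (fun hc => h (hcond.1 hc)), if_neg (by rw [hQx]; simpa using h)]
        simp

lemma foldl_max_sorted : ∀ (t : List Int) (a : Int), (a :: t).Pairwise (· ≤ ·) →
    t.foldl max a = (a :: t).getLast (by simp) := by
  intro t
  induction t with
  | nil => intro a _; simp
  | cons b t ih =>
    intro a h
    have hab : a ≤ b := (List.pairwise_cons.1 h).1 b (by simp)
    have h' : (b :: t).Pairwise (· ≤ ·) := (List.pairwise_cons.1 h).2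
    simp only [List.foldl_cons, max_eq_right hab]
    rw [ih b h']
    simp

lemma max?_sorted_eq_getLast? (l : List Int) (hl : l.Pairwise (· ≤ ·)) :
    PySem.List.max? l (fun y => y) = l.getLast? := by
  cases l with
  | nil => rfl
  | cons a t =>
    rw [PySem.List.max?_id_cons, foldl_max_sorted t a hl, List.getLast?_eq_getLast]

-- ===== VERDICT (by name: the statement is the Claim_ definition above) =====
theorem solution_spec : Claim_equal_solution := by
  intro citations _ _
  unfold Spec_solution solution_alt
  show _ = (altScan (PySem.List.sorted citations (fun x => x) false)
      (PySem.List.sorted citations (fun x => x) false).length 0 none).getD 0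
  rw [solution_eq]
  have hs : (PySem.List.sorted citations (fun x => x) false).Pairwise (· ≤ ·) :=
    PySem.List.sorted_pairwise citations (fun x => x)
  rw [show (0 : Nat) = ([] : List Int).length from rfl,
      altScan_spec_aux (PySem.List.sorted citations (fun x => x) false) hs
        (PySem.List.sorted citations (fun x => x) false).length
        (PySem.List.sorted citations (fun x => x) false) [] none (le_refl _) rfl (by simp)]
  rw [Option.or_none]
  exact congrArg (fun o => o.getD 0)
    (max?_sorted_eq_getLast? _ (hs.sublist List.filter_sublist))
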